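-- pv_equiv track=rewrite | github.com/JJR15/NodeUpdate | diffscript/diff.py | find_diff
-- ===== SOURCE A (Python) =====
-- def findK(old, new, i):
--     min_k = i
--     off = -1
--     j=len(old)
--     while j>=0:
--         if old[j-1]==new[i-1]:
--             k = i - 1
--             while k>=max(i-j,0):
--                 if old[j+k-i]==new[k]:
--                     k-=1
--                 else:
--                     break
--             if k + 1 < min_k:
--                 min_k = k + 1
--                 off = j + k - i + 1
--         j-=1
--     return (min_k, off)
--
-- def find_diff(old, new):
--     # copy: (cost, 0, n, addr)
--     # add: (cost, 1, n)
--     # type 1bit  n 3bytes  addr 3bytes  copycost:6 addcost:n+3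
--     opt = [(0,1,0,0)for i in range(len(new)+1)]
--     for i in range(1, len(new)+1):
--         if opt[i-1][1]==0:
--             if opt[i-1][2]+opt[i-1][3] <len(old):
--                 if old[opt[i-1][2]+opt[i-1][3]]==new[i-1]:
--                     opt[i] = (opt[i-1][0], 0, opt[i-1][2]+1, opt[i-1][3])
--                     continue
--
--         #new[k,i-1]==old[]
--         (k, offset) = findK(old, new, i)
--         if k < i:
--             # opt[k] + copy(k,i]
--             cost1 = opt[k][0] + 6
--             # opt[k] + add[i]
--             if opt[i-1][1]==1:
--                 cost2 = opt[i-1][0] + 1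
--             else:
--                 # new add
--                 cost2 = opt[i-1][0] + 4
--
--             if cost1 < cost2:
--                 opt[i] = (cost1, 0, i-k, offset)
--             elif opt[i-1][1]==0:
--                 opt[i] = (cost2, 1, 1)
--             else:
--                 opt[i] = (cost2, 1, opt[i-1][2]+1)
--
--         else:
--             cost2 = opt[i-1][0] + 4
--             opt[i] = (cost2, 1, 1)
--
--     deltas = []
--     i = len(new)
--     while i > 0:
--         deltas.append(opt[i])
--         i-=opt[i][2]
--
--     deltas.reverse()
--     return deltas
-- ===== SOURCE B (Python) =====
-- def find_diff(old, new):
--     n = len(old)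
--     opt = [(0, 1, 0, 0)]
--     row = [0] * (n + 1)  # row[j] = longest common suffix of old[:j] and new[:i]
--     for i in range(1, len(new) + 1):
--         c = new[i - 1]
--         new_row = [0] * (n + 1)
--         best_m = 0
--         best_j = n
--         for j in range(1, n + 1):
--             if old[j - 1] == c:
--                 new_row[j] = row[j - 1] + 1
--             if new_row[j] >= best_m:
--                 best_m = new_row[j]
--                 best_j = j
--         row = new_row
--         prev = opt[i - 1]
--         if prev[1] == 0 and prev[2] + prev[3] < n and old[prev[2] + prev[3]] == c:
--             opt.append((prev[0], 0, prev[2] + 1, prev[3]))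
--             continue
--         k = i - best_m
--         offset = best_j - best_m
--         if k < i:
--             cost1 = opt[k][0] + 6
--             cost2 = prev[0] + (1 if prev[1] == 1 else 4)
--             if cost1 < cost2:
--                 opt.append((cost1, 0, i - k, offset))
--             elif prev[1] == 0:
--                 opt.append((cost2, 1, 1))
--             else:
--                 opt.append((cost2, 1, prev[2] + 1))
--         else:
--             opt.append((prev[0] + 4, 1, 1))
--     deltas = []
--     i = len(new)
--     while i > 0:
--         deltas.append(opt[i])
--         i -= opt[i][2]
--     deltas.reverse()
--     return deltas
-- ===== Notes on version B (the rewrite author's own statement) =====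
-- stated objective: faster
-- what changed: A recomputes each candidate match from scratch with a per-(i,j) backward scan (findK); B keeps a rolling dynamic-programming row of longest-common-suffix lengths (row[j] for old[:j] vs new[:i]), updated in O(1) per cell, so the inner extension scan disappears.
import Mathlib
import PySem

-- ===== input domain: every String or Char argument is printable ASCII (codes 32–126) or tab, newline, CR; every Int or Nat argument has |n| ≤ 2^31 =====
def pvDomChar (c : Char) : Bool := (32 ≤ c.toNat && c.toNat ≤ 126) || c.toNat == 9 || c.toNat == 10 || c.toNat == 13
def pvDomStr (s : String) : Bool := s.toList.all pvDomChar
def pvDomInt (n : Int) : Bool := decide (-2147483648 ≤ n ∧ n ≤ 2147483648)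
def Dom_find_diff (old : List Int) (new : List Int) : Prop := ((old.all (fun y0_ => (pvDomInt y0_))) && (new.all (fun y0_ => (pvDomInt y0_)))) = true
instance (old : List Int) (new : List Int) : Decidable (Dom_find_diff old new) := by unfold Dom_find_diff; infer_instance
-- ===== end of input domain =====

-- B replaces A's per-position backward match scan (findK) by a rolling DP row of
-- longest-common-suffix lengths, removing the inner extension loop. Equivalence is
-- about the return value; neither version mutates its arguments.

-- ===== PORT A =====

-- inner `while k >= max(i-j, 0)` loop of findK; fuel bounds the iterations
-- (called with fuel = i.toNat, which is enough: k starts at i-1 and decreases)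
def findK_inner (old new : List Int) (i j : Int) : Int → Nat → Int
  | k, 0 => k
  | k, fuel+1 =>
    if k ≥ max (i - j) 0 then
      match PySem.List.pyGet? old (j + k - i), PySem.List.pyGet? new k with
      | some a, some b => if a = b then findK_inner old new i j (k - 1) fuel else k
      | _, _ => k          -- IndexError in Python (unreachable inside Pre_)
    else k

-- body of the `while j >= 0` loop for one value j = jn
def findK_step (old new : List Int) (i : Int) (jn : Nat) (acc : Int × Int) : Int × Int :=
  match PySem.List.pyGet? old ((jn : Int) - 1), PySem.List.pyGet? new (i - 1) with
  | some a, some b =>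
    if a = b then
      let k := findK_inner old new i (jn : Int) (i - 1) i.toNat
      if k + 1 < acc.1 then (k + 1, (jn : Int) + k - i + 1) else acc
    else acc
  | _, _ => acc            -- old[-1] on empty old: IndexError in Python (outside Pre_)

def findK_go (old new : List Int) (i : Int) : Nat → Int × Int → Int × Int
  | 0, acc => findK_step old new i 0 acc
  | jn+1, acc => findK_go old new i jn (findK_step old new i (jn+1) acc)

def findK (old new : List Int) (i : Int) : Int × Int :=
  findK_go old new i old.length (i, -1)

-- one iteration of A's `for i in range(1, len(new)+1)` loop (tuple reads are in
-- range by construction, so List.getD is exact for Python's indexing here)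
def aStep (old new : List Int) (opt : List (List Int)) (i : Nat) : List Int :=
  let prev := opt.getD (i - 1) []
  let p0 := prev.getD 0 0
  let p1 := prev.getD 1 0
  let p2 := prev.getD 2 0
  let p3 := prev.getD 3 0
  let fastOk : Bool :=
    if p1 = 0 ∧ p2 + p3 < (old.length : Int) then
      match PySem.List.pyGet? old (p2 + p3), PySem.List.pyGet? new ((i : Int) - 1) with
      | some a, some b => a == b
      | _, _ => false
    else false
  if fastOk then [p0, 0, p2 + 1, p3]
  else
    let ko := findK old new (i : Int)
    let k := ko.1
    let offset := ko.2
    if k < (i : Int) then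
      let cost1 := (opt.getD k.toNat []).getD 0 0 + 6
      let cost2 := if p1 = 1 then p0 + 1 else p0 + 4
      if cost1 < cost2 then [cost1, 0, (i : Int) - k, offset]
      else if p1 = 0 then [cost2, 1, 1]
      else [cost2, 1, p2 + 1]
    else [p0 + 4, 1, 1]

def aLoop (old new : List Int) : Nat → List (List Int)
  | 0 => [[0, 1, 0, 0]]
  | c+1 => let opt := aLoop old new c; opt ++ [aStep old new opt (c+1)]

-- `while i > 0` back-trace; fuel len(new)+1 is enough (each step drops i by opt[i][2] ≥ 1)
def aBack (opt : List (List Int)) : Int → Nat → List (List Int) → List (List Int)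
  | _, 0, acc => acc
  | i, f+1, acc =>
    if 0 < i then
      let t := opt.getD i.toNat []
      aBack opt (i - t.getD 2 0) f (acc ++ [t])
    else acc

def find_diff (old : List Int) (new : List Int) : List (List Int) :=
  (aBack (aLoop old new new.length) (new.length : Int) (new.length + 1) []).reverse

-- ===== PORT B =====

-- Source B inner loop: walk old (element o at index j-1) and the previous DP row
-- (r = row[j-1]) together, building the new row and the running best (bm, bj)
def bScan (c : Int) : List Int → List Int → Nat → List Int → Int → Int → List Int × Int × Int
  | [], _, _, nr, bm, bj => (nr, bm, bj)
  | _ :: _, [], _, nr, bm, bj => (nr, bm, bj)   -- unreachable: row is longer than old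
  | o :: os, r :: rs, j, nr, bm, bj =>
    let v := if o = c then r + 1 else 0
    let bm' := if v ≥ bm then v else bm
    let bj' := if v ≥ bm then (j : Int) else bj
    bScan c os rs (j + 1) (nr ++ [v]) bm' bj'

def bStep (old new : List Int) (opt : List (List Int)) (i : Nat) (bm bj : Int) : List Int :=
  let prev := opt.getD (i - 1) []
  let p0 := prev.getD 0 0
  let p1 := prev.getD 1 0
  let p2 := prev.getD 2 0
  let p3 := prev.getD 3 0
  let fastOk : Bool :=
    if p1 = 0 ∧ p2 + p3 < (old.length : Int) then
      match PySem.List.pyGet? old (p2 + p3), PySem.List.pyGet? new ((i : Int) - 1) with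
      | some a, some b => a == b
      | _, _ => false
    else false
  if fastOk then [p0, 0, p2 + 1, p3]
  else
    let k := (i : Int) - bm
    let offset := bj - bm
    if k < (i : Int) then
      let cost1 := (opt.getD k.toNat []).getD 0 0 + 6
      let cost2 := if p1 = 1 then p0 + 1 else p0 + 4
      if cost1 < cost2 then [cost1, 0, (i : Int) - k, offset]
      else if p1 = 0 then [cost2, 1, 1]
      else [cost2, 1, p2 + 1]
    else [p0 + 4, 1, 1]

-- main loop state: (opt so far, current DP row)
def bLoop (old new : List Int) : Nat → List (List Int) × List Int
  | 0 => ([[0, 1, 0, 0]], List.replicate (old.length + 1) 0)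
  | c+1 =>
    let s := bLoop old new c
    let r := bScan (new.getD c 0) old s.2 1 [0] 0 (old.length : Int)
    (s.1 ++ [bStep old new s.1 (c+1) r.2.1 r.2.2], r.1)

def bBack (opt : List (List Int)) : Int → Nat → List (List Int) → List (List Int)
  | _, 0, acc => acc
  | i, f+1, acc =>
    if 0 < i then
      let t := opt.getD i.toNat []
      bBack opt (i - t.getD 2 0) f (acc ++ [t])
    else acc

def find_diff_alt (old : List Int) (new : List Int) : List (List Int) :=
  ((bBack (bLoop old new new.length).1 (new.length : Int) (new.length + 1) []).reverse)

-- ===== PRECONDITION & SPEC =====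
-- Pre_ excludes exactly the inputs where A raises: old == [] with new nonempty
-- (findK evaluates old[-1], an IndexError on an empty list).
def Pre_find_diff (old : List Int) (new : List Int) : Prop := old ≠ [] ∨ new = []
instance (old : List Int) (new : List Int) : Decidable (Pre_find_diff old new) := by unfold Pre_find_diff; infer_instance
def pvWitness_find_diff : List Int × List Int := ([1, 2], [1, 2, 3])


def Spec_find_diff (old : List Int) (new : List Int) (out : List (List Int)) : Prop := out = find_diff_alt old new
instance (old : List Int) (new : List Int) (out : List (List Int)) : Decidable (Spec_find_diff old new out) := by unfold Spec_find_diff; infer_instance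

-- ===== CLAIM (what is proved, stated in full; the proofs are below) =====
def Claim_equal_find_diff : Prop := ∀ (old : List Int) (new : List Int), Dom_find_diff old new → Pre_find_diff old new → Spec_find_diff old new (find_diff old new)

-- ===== LEMMAS AND PROOFS =====

-- longest common suffix length of old[:j] and new[:i]
def mlen (old new : List Int) : Nat → Nat → Nat
  | j+1, i+1 => if old.getD j 0 = new.getD i 0 then mlen old new j i + 1 else 0
  | _, _ => 0

-- running maximum of mlen over j = 1..jn at fixed i
def Mx (old new : List Int) (i : Nat) : Nat → Nat
  | 0 => 0
  | jn+1 => max (Mx old new i jn) (mlen old new (jn+1) i)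

-- last j ≤ jn whose mlen reaches the running maximum (old.length at jn = 0,
-- matching B's initial best_j = n; only relevant when the maximum is 0)
def Jx (old new : List Int) (i : Nat) : Nat → Nat
  | 0 => old.length
  | jn+1 => if mlen old new (jn+1) i ≥ Mx old new i jn then jn + 1 else Jx old new i jn

-- DP row after i characters of new: [mlen 0 i, mlen 1 i, …, mlen n i]
def rowL (old new : List Int) (i : Nat) : List Int :=
  (List.range (old.length + 1)).map (fun j => (mlen old new j i : Int))

lemma rowL_length (old new : List Int) (i : Nat) : (rowL old new i).length = old.length + 1 := by
  simp [rowL]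

lemma rowL_get (old new : List Int) (i t : Nat) (ht : t < old.length + 1) :
    (rowL old new i)[t]'(by rw [rowL_length]; omega) = (mlen old new t i : Int) := by
  simp [rowL]

lemma mlen_zero (old new : List Int) (j : Nat) : mlen old new j 0 = 0 := by
  cases j <;> rfl

lemma mlen_zero_left (old new : List Int) (i : Nat) : mlen old new 0 i = 0 := by
  cases i <;> rfl

lemma findK_inner_shift (old new : List Int) :
    ∀ (fuel : Nat) (i j k : Int),
    findK_inner old new i j k fuel = findK_inner old new (i - 1) (j - 1) k fuel := by
  intro fuel
  induction fuel with
  | zero => intro i j k; rfl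
  | succ f ih =>
    intro i j k
    simp only [findK_inner]
    rw [show i - 1 - (j - 1) = i - j by ring, show j - 1 + k - (i - 1) = j + k - i by ring]
    by_cases h : k ≥ max (i - j) 0
    · simp only [if_pos h]
      cases PySem.List.pyGet? old (j + k - i) with
      | none => rfl
      | some a =>
        cases PySem.List.pyGet? new k with
        | none => rfl
        | some b =>
          by_cases hab : a = b
          · simp only [if_pos hab]; exact ih i j (k - 1)
          · simp only [if_neg hab]
    · simp only [if_neg h]

lemma findK_inner_spec (old new : List Int) :
    ∀ (iN : Nat) (jn : Nat) (fuel : Nat), 1 ≤ iN → iN ≤ new.length → 1 ≤ jn → jn ≤ old.length →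
    iN ≤ fuel →
    findK_inner old new (iN : Int) (jn : Int) ((iN : Int) - 1) fuel
      = (iN : Int) - 1 - (mlen old new jn iN : Int) := by
  intro iN
  induction iN with
  | zero => intro jn fuel h1 _ _ _ _; omega
  | succ m ih =>
    intro jn fuel _ h2 h3 h4 h5
    obtain ⟨jj, rfl⟩ : ∃ jj, jn = jj + 1 := ⟨jn - 1, by omega⟩
    obtain ⟨f, rfl⟩ : ∃ f, fuel = f + 1 := ⟨fuel - 1, by omega⟩
    simp only [findK_inner]
    rw [if_pos (by push_cast; omega)]
    rw [show ((jj+1 : Nat) : Int) + (((m+1 : Nat) : Int) - 1) - ((m+1 : Nat) : Int) = ((jj : Nat) : Int) by push_cast; ring]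
    rw [show (((m+1 : Nat) : Int) - 1) = ((m : Nat) : Int) by push_cast; ring]
    rw [PySem.List.pyGet?_natCast, PySem.List.pyGet?_natCast]
    have hj : jj < old.length := by omega
    have hm : m < new.length := by omega
    rw [List.getElem?_eq_getElem hj, List.getElem?_eq_getElem hm]
    simp only [mlen]
    rw [List.getD_eq_getElem old 0 hj, List.getD_eq_getElem new 0 hm]
    by_cases hab : old[jj] = new[m]
    · rw [if_pos hab, if_pos hab]
      rw [findK_inner_shift]
      rw [show ((m+1 : Nat) : Int) - 1 = ((m : Nat) : Int) by push_cast; ring,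
          show ((jj+1 : Nat) : Int) - 1 = ((jj : Nat) : Int) by push_cast; ring]
      rcases Nat.eq_zero_or_pos m with hm0 | hm1
      · subst hm0
        cases f with
        | zero => simp only [findK_inner]; simp [mlen_zero]
        | succ g =>
          simp only [findK_inner]
          rw [if_neg (by push_cast; omega)]
          simp [mlen_zero]
      · rcases Nat.eq_zero_or_pos jj with hj0 | hj1
        · subst hj0
          obtain ⟨g, rfl⟩ : ∃ g, f = g + 1 := ⟨f - 1, by omega⟩
          simp only [findK_inner]
          rw [if_neg (by push_cast; omega)]
          simp [mlen_zero_left]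
        · rw [ih jj f hm1 (by omega) hj1 (by omega) (by omega)]
          push_cast; ring
    · rw [if_neg hab, if_neg hab]
      push_cast; ring

lemma findK_step_zero (old new : List Int) (iN : Nat) (acc : Int × Int)
    (h1 : 1 ≤ iN) (hacc : acc.1 ≤ (iN : Int)) :
    findK_step old new (iN : Int) 0 acc = acc := by
  simp only [findK_step]
  cases ho : PySem.List.pyGet? old (((0 : Nat) : Int) - 1) with
  | none => cases PySem.List.pyGet? new ((iN : Int) - 1) <;> rfl
  | some a =>
    cases hn : PySem.List.pyGet? new ((iN : Int) - 1) with
    | none => rfl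
    | some b =>
      by_cases hab : a = b
      · simp only [if_pos hab]
        have hk : findK_inner old new (iN : Int) ((0 : Nat) : Int) ((iN : Int) - 1) (iN : Int).toNat
            = (iN : Int) - 1 := by
          obtain ⟨f, hf⟩ : ∃ f, (iN : Int).toNat = f + 1 := ⟨iN - 1, by omega⟩
          rw [hf]
          simp only [findK_inner]
          rw [if_neg (by push_cast; omega)]
        rw [hk, if_neg (by omega)]
      · simp only [if_neg hab]

lemma findK_go_spec (old new : List Int) (iN : Nat) (h1 : 1 ≤ iN) (h2 : iN ≤ new.length) :
    ∀ (jn : Nat), jn ≤ old.length → ∀ (acc : Int × Int), acc.1 ≤ (iN : Int) →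
    findK_go old new (iN : Int) jn acc =
      if (iN : Int) - (Mx old new iN jn : Int) < acc.1 then
        ((iN : Int) - (Mx old new iN jn : Int), (Jx old new iN jn : Int) - (Mx old new iN jn : Int))
      else acc := by
  intro jn
  induction jn with
  | zero =>
    intro _ acc hacc
    show findK_step old new (iN : Int) 0 acc = _
    rw [findK_step_zero old new iN acc h1 hacc]
    simp only [Mx]
    rw [if_neg (by push_cast; omega)]
  | succ jj ih =>
    intro hle acc hacc
    have hjj : jj < old.length := by omega
    have hin : iN - 1 < new.length := by omega
    show findK_go old new (iN : Int) jj (findK_step old new (iN : Int) (jj+1) acc) = _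
    have hstep : findK_step old new (iN : Int) (jj+1) acc
        = if ((iN : Int) - (mlen old new (jj+1) iN : Int)) < acc.1
          then ((iN : Int) - (mlen old new (jj+1) iN : Int), ((jj+1 : Nat) : Int) - (mlen old new (jj+1) iN : Int))
          else acc := by
      simp only [findK_step]
      rw [show ((jj+1 : Nat) : Int) - 1 = ((jj : Nat) : Int) by push_cast; ring]
      rw [show (iN : Int) - 1 = ((iN - 1 : Nat) : Int) by omega]
      rw [PySem.List.pyGet?_natCast, PySem.List.pyGet?_natCast,
          List.getElem?_eq_getElem hjj, List.getElem?_eq_getElem hin]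
      by_cases hab : old[jj] = new[iN - 1]
      · simp only [if_pos hab]
        rw [show ((iN - 1 : Nat) : Int) = (iN : Int) - 1 by omega]
        rw [show ((iN : Int)).toNat = iN by omega]
        rw [findK_inner_spec old new iN (jj+1) iN h1 h2 (by omega) (by omega) le_rfl]
        rw [show (iN : Int) - 1 - (mlen old new (jj+1) iN : Int) + 1 = (iN : Int) - (mlen old new (jj+1) iN : Int) by ring]
        rw [show ((jj+1 : Nat) : Int) + ((iN : Int) - 1 - (mlen old new (jj+1) iN : Int)) - (iN : Int) + 1 = ((jj+1 : Nat) : Int) - (mlen old new (jj+1) iN : Int) by ring]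
      · simp only [if_neg hab]
        have hz : mlen old new (jj+1) iN = 0 := by
          obtain ⟨ii, rfl⟩ : ∃ ii, iN = ii + 1 := ⟨iN - 1, by omega⟩
          simp only [mlen]
          rw [List.getD_eq_getElem old 0 hjj, List.getD_eq_getElem new 0 (by omega)]
          simp only [Nat.add_sub_cancel] at hab
          rw [if_neg hab]
        rw [hz]
        rw [if_neg (by push_cast; omega)]
    rw [hstep]
    by_cases hM : ((iN : Int) - (mlen old new (jj+1) iN : Int)) < acc.1
    · rw [if_pos hM, ih (by omega) _ (by dsimp only; omega)]
      dsimp only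
      simp only [Mx, Jx]
      split_ifs <;>
        first
          | rfl
          | (exfalso; push_cast at *; omega)
          | (refine Prod.ext ?_ ?_ <;> dsimp only <;> push_cast at * <;> omega)
    · rw [if_neg hM, ih (by omega) acc hacc]
      simp only [Mx, Jx]
      split_ifs <;>
        first
          | rfl
          | (exfalso; push_cast at *; omega)
          | (refine Prod.ext ?_ ?_ <;> dsimp only <;> push_cast at * <;> omega)

lemma bScan_spec (old new : List Int) (iN : Nat) (h1 : 1 ≤ iN) :
    ∀ (t : Nat), t ≤ old.length →
    bScan (new.getD (iN - 1) 0) (old.drop t) ((rowL old new (iN - 1)).drop t) (t + 1)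
      ((rowL old new iN).take (t + 1)) (Mx old new iN t : Int) (Jx old new iN t : Int)
      = (rowL old new iN, (Mx old new iN old.length : Int), (Jx old new iN old.length : Int)) := by
  suffices H : ∀ (rem t : Nat), old.length - t = rem → t ≤ old.length →
      bScan (new.getD (iN - 1) 0) (old.drop t) ((rowL old new (iN - 1)).drop t) (t + 1)
        ((rowL old new iN).take (t + 1)) (Mx old new iN t : Int) (Jx old new iN t : Int)
        = (rowL old new iN, (Mx old new iN old.length : Int), (Jx old new iN old.length : Int)) by
    intro t ht; exact H _ t rfl ht
  intro rem
  induction rem with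
  | zero =>
    intro t hr ht
    have htt : t = old.length := by omega
    subst htt
    rw [List.drop_length]
    simp only [bScan]
    rw [List.take_of_length_le (by rw [rowL_length])]
  | succ rem ihr =>
    intro t hr ht
    have htl : t < old.length := by omega
    rw [List.drop_eq_getElem_cons htl,
        List.drop_eq_getElem_cons (show t < (rowL old new (iN - 1)).length by rw [rowL_length]; omega)]
    simp only [bScan]
    rw [rowL_get old new (iN - 1) t (by omega)]
    have hv : (if old[t] = new.getD (iN - 1) 0 then ((mlen old new t (iN - 1) : Int)) + 1 else 0)
        = ((mlen old new (t+1) iN : Int)) := by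
      obtain ⟨ii, rfl⟩ : ∃ ii, iN = ii + 1 := ⟨iN - 1, by omega⟩
      simp only [Nat.add_sub_cancel, mlen]
      rw [List.getD_eq_getElem old 0 htl]
      split_ifs with hx
      · push_cast; ring
      · norm_num
    rw [hv]
    have hbm : (if ((mlen old new (t+1) iN : Int)) ≥ (Mx old new iN t : Int)
          then ((mlen old new (t+1) iN : Int)) else (Mx old new iN t : Int))
        = (Mx old new iN (t+1) : Int) := by
      simp only [Mx]; split_ifs <;> (push_cast; omega)
    have hbj : (if ((mlen old new (t+1) iN : Int)) ≥ (Mx old new iN t : Int)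
          then ((t + 1 : Nat) : Int) else (Jx old new iN t : Int))
        = (Jx old new iN (t+1) : Int) := by
      simp only [Jx]; split_ifs with h h' <;> push_cast at * <;> omega
    rw [hbm, hbj]
    rw [show (rowL old new iN).take (t+1) ++ [((mlen old new (t+1) iN : Int))]
        = (rowL old new iN).take (t+2) by
      rw [← rowL_get old new iN (t+1) (by omega)]
      exact List.take_append_getElem (by rw [rowL_length]; omega)]
    exact ihr (t+1) (by omega) (by omega)

lemma step_eq (old new : List Int) (opt : List (List Int)) (iN : Nat)
    (h1 : 1 ≤ iN) (h2 : iN ≤ new.length) :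
    aStep old new opt iN
      = bStep old new opt iN (Mx old new iN old.length : Int) (Jx old new iN old.length : Int) := by
  have hgo := findK_go_spec old new iN h1 h2 old.length le_rfl ((iN : Int), -1) (by norm_num)
  by_cases hM : Mx old new iN old.length = 0
  · simp only [aStep, bStep, findK, hgo, hM]
    norm_num
  · have hlt : (iN : Int) - (Mx old new iN old.length : Int) < (iN : Int) := by
      have := Nat.pos_of_ne_zero hM; omega
    simp only [aStep, bStep, findK, hgo]
    simp only [if_pos hlt]

lemma loop_spec (old new : List Int) :
    ∀ (c : Nat), c ≤ new.length → bLoop old new c = (aLoop old new c, rowL old new c) := by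
  intro c
  induction c with
  | zero =>
    intro _
    simp only [bLoop, aLoop]
    refine Prod.ext rfl ?_
    simp [rowL, mlen_zero]
  | succ c ihc =>
    intro hc
    simp only [bLoop]
    rw [ihc (by omega)]
    have htake1 : (rowL old new (c+1)).take 1 = [0] := by
      rw [rowL, ← List.map_take, List.take_range, show min 1 (old.length+1) = 1 by omega,
        List.range_one]
      simp [mlen_zero_left]
    have hb := bScan_spec old new (c+1) (by omega) 0 (by omega)
    simp only [Nat.add_sub_cancel, List.drop_zero, Nat.zero_add, htake1, Mx, Jx,
      Nat.cast_zero] at hb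
    rw [hb]
    simp only [aLoop]
    rw [← step_eq old new (aLoop old new c) (c+1) (by omega) hc]

lemma back_eq (opt : List (List Int)) :
    ∀ (f : Nat) (i : Int) (acc : List (List Int)), bBack opt i f acc = aBack opt i f acc := by
  intro f
  induction f with
  | zero => intro i acc; rfl
  | succ g ih =>
    intro i acc
    simp only [bBack, aBack]
    by_cases h : 0 < i
    · simp only [if_pos h]; exact ih _ _
    · simp only [if_neg h]

-- ===== VERDICT (by name: the statement is the Claim_ definition above) =====
theorem find_diff_spec : Claim_equal_find_diff := by
  intro old new _ _
  unfold Spec_find_diff find_diff find_diff_alt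
  rw [loop_spec old new new.length le_rfl, back_eq]
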